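-- pv_equiv track=rewrite | github.com/GeekCC/leetcode | part2/part2_8.py | max_matrix
-- ===== SOURCE A (Python) =====
-- def max_matrix(matrix):
--     max_submatrix_sum = matrix[0][0]
--     max_submatrix_start_row = 0
--     max_submatrix_start_col = 0
--     max_submatrix_end_col = 0
--     max_submatrix_end_row = 0
--
--     for matrix_col_len in range(1,len(matrix[0])+1):
--         for start_col in range(len(matrix[0])+1 - matrix_col_len):
--             maxseq = sum(matrix[0][start_col:start_col + matrix_col_len])
--             end_index  = 0
--             trans = [0] * len(matrix[0])
--             trans[0] = sum(matrix[0][start_col:start_col + matrix_col_len])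
--             for i in range(1, len(matrix[0])):
--                 if sum(matrix[i][start_col:start_col + matrix_col_len]) > sum(matrix[i][start_col:start_col + matrix_col_len]) + trans[i-1]:
--                     trans[i] = sum(matrix[i][start_col:start_col + matrix_col_len])
--                 else:
--                     trans[i] = sum(matrix[i][start_col:start_col + matrix_col_len]) + trans[i-1]
--                     if trans[i] >= maxseq:
--                         maxseq = trans[i]
--                         end_index = i
--
--             if maxseq <= 0:
--                start_row_index = end_index
--             else:
--                 start_row_index = end_index
--                 while trans[start_row_index] > 0 and start_row_index >= 0:
--                     start_row_index -= 1
--                 start_row_index += 1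
--             if maxseq > max_submatrix_sum:
--                 max_submatrix_sum = maxseq
--                 max_submatrix_start_row = start_row_index
--                 max_submatrix_start_col = start_col
--                 max_submatrix_end_col = start_col + matrix_col_len - 1
--                 max_submatrix_end_row = end_index
--     out = []
--     for i in range(max_submatrix_start_row, max_submatrix_end_row+1):
--         out.append(matrix[i][max_submatrix_start_col:max_submatrix_end_col+1])
--
--     return max_submatrix_sum, out
-- ===== SOURCE B (Python) =====
-- def max_matrix(matrix):
--     n = len(matrix[0])
--     # column prefix sums for the n rows the scan visits: strip sums in O(1)
--     pre = []
--     for i in range(n):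
--         acc = [0]
--         s = 0
--         for x in matrix[i]:
--             s += x
--             acc.append(s)
--         pre.append(acc)
--
--     def seg(i, a, b):
--         acc = pre[i]
--         m = len(acc) - 1
--         return acc[b if b < m else m] - acc[a if a < m else m]
--
--     best_sum = matrix[0][0]
--     br0 = bc0 = bc1 = br1 = 0
--     for w in range(1, n + 1):
--         for sc in range(n + 1 - w):
--             t = seg(0, sc, sc + w)
--             best = t
--             end = 0
--             lastnp = 0 if t <= 0 else -1   # last row index with running sum <= 0
--             start_cand = lastnp + 1
--             for i in range(1, n):
--                 s = seg(i, sc, sc + w)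
--                 if t < 0:
--                     t = s
--                 else:
--                     t = s + t
--                     if t >= best:
--                         best = t
--                         end = i
--                         start_cand = lastnp + 1
--                 if t <= 0:
--                     lastnp = i
--             start = end if best <= 0 else start_cand
--             if best > best_sum:
--                 best_sum = best
--                 br0, bc0, bc1, br1 = start, sc, sc + w - 1, end
--     return best_sum, [matrix[i][bc0:bc1 + 1] for i in range(br0, br1 + 1)]
-- ===== Notes on version B (the rewrite author's own statement) =====
-- stated objective: faster
-- what changed: B precomputes per-row prefix sums so every strip (row-segment) sum is O(1) instead of re-summing slices, and replaces A's trans array plus backward while-loop with a single forward Kadane pass that tracks the running segment start, removing a factor proportional to cols*width.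
import Mathlib
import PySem

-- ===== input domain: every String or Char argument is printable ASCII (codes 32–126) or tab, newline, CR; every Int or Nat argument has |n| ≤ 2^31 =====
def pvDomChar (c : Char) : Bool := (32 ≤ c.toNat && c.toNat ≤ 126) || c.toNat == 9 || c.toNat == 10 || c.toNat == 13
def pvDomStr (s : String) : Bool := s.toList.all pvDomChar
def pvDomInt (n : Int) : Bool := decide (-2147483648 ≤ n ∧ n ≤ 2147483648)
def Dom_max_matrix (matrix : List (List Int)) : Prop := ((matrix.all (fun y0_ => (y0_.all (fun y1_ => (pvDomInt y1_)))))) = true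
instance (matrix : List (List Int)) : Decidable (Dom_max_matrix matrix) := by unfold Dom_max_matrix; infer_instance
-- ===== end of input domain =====

-- B precomputes per-row prefix sums (O(1) strip sums) and runs a single forward Kadane pass per strip
-- instead of A's slice re-summing, trans array and backward while-loop; measurably faster (asymptotic).

-- ===== PORT A =====
-- sum(matrix[i][start_col : start_col + matrix_col_len])
def segA (matrix : List (List Int)) (i sc w : Int) : Int :=
  (PySem.List.slice (PySem.List.pyGetD matrix i []) (some sc) (some (sc + w))).sum

-- while trans[start_row_index] > 0 and start_row_index >= 0: start_row_index -= 1
def walkA (trans : List Int) (idx : Int) : Int :=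
  if h : PySem.List.pyGetD trans idx 0 > 0 ∧ 0 ≤ idx then walkA trans (idx - 1) else idx
termination_by (idx + 1).toNat
decreasing_by omega

-- body of 'for i in range(1, len(matrix[0]))' : state = (trans, maxseq, end_index)
def stepA (matrix : List (List Int)) (sc w : Int) (st : List Int × Int × Int) (i : Int) :
    List Int × Int × Int :=
  if segA matrix i sc w > segA matrix i sc w + PySem.List.pyGetD st.1 (i - 1) 0 then
    (PySem.List.pySetD st.1 i (segA matrix i sc w), st.2.1, st.2.2)
  else
    let v := segA matrix i sc w + PySem.List.pyGetD st.1 (i - 1) 0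
    if v ≥ st.2.1 then (PySem.List.pySetD st.1 i v, v, i)
    else (PySem.List.pySetD st.1 i v, st.2.1, st.2.2)

def innerA (matrix : List (List Int)) (n sc w : Int) : List Int × Int × Int :=
  (PySem.List.pyRange 1 n 1).foldl (stepA matrix sc w)
    (PySem.List.pySetD (List.replicate n.toNat (0 : Int)) 0 (segA matrix 0 sc w),
      segA matrix 0 sc w, 0)

-- (maxseq, start_row_index, end_index) for one strip
def candA (matrix : List (List Int)) (n sc w : Int) : Int × Int × Int :=
  let r := innerA matrix n sc w
  (r.2.1, if r.2.1 ≤ 0 then r.2.2 else walkA r.1 r.2.2 + 1, r.2.2)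

-- if maxseq > max_submatrix_sum: update the five tracked variables
def updA (st : Int × Int × Int × Int × Int) (c : Int × Int × Int) (sc w : Int) :
    Int × Int × Int × Int × Int :=
  if c.1 > st.1 then (c.1, c.2.1, sc, sc + w - 1, c.2.2) else st

def max_matrix (matrix : List (List Int)) : Int × List (List Int) :=
  let row0 := PySem.List.pyGetD matrix 0 []
  let n : Int := (row0.length : Int)
  let st := (PySem.List.pyRange 1 (n + 1) 1).foldl (fun st w =>
      (PySem.List.pyRange 0 (n + 1 - w) 1).foldl (fun st sc =>
        updA st (candA matrix n sc w) sc w) st)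
    (PySem.List.pyGetD row0 0 0, 0, 0, 0, 0)
  (st.1, (PySem.List.pyRange st.2.1 (st.2.2.2.2 + 1) 1).foldl
    (fun acc i => acc ++ [PySem.List.slice (PySem.List.pyGetD matrix i [])
      (some st.2.2.1) (some (st.2.2.2.1 + 1))]) [])

-- ===== PORT B =====
-- prefix sums of one row, built left to right as in Source B
def prefB (row : List Int) : List Int :=
  (row.foldl (fun (p : List Int × Int) x => (p.1 ++ [p.2 + x], p.2 + x)) ([0], 0)).1

def preB (matrix : List (List Int)) (n : Int) : List (List Int) :=
  (PySem.List.pyRange 0 n 1).map (fun i => prefB (PySem.List.pyGetD matrix i []))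

-- seg(i, a, b) of Source B
def segB (pre : List (List Int)) (i a b : Int) : Int :=
  let acc := PySem.List.pyGetD pre i []
  let m : Int := (acc.length : Int) - 1
  PySem.List.pyGetD acc (if b < m then b else m) 0 -
    PySem.List.pyGetD acc (if a < m then a else m) 0

-- body of Source B's inner loop : state = (t, best, end, lastnp, start_cand)
def stepB (pre : List (List Int)) (sc w : Int) (st : Int × Int × Int × Int × Int) (i : Int) :
    Int × Int × Int × Int × Int :=
  let s := segB pre i sc (sc + w)
  let u : Int × Int × Int × Int :=
    if st.1 < 0 then (s, st.2.1, st.2.2.1, st.2.2.2.2)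
    else if s + st.1 ≥ st.2.1 then (s + st.1, s + st.1, i, st.2.2.2.1 + 1)
    else (s + st.1, st.2.1, st.2.2.1, st.2.2.2.2)
  (u.1, u.2.1, u.2.2.1, if u.1 ≤ 0 then i else st.2.2.2.1, u.2.2.2)

def innerB (pre : List (List Int)) (n sc w : Int) : Int × Int × Int × Int × Int :=
  let t0 := segB pre 0 sc (sc + w)
  let l0 : Int := if t0 ≤ 0 then 0 else -1
  (PySem.List.pyRange 1 n 1).foldl (stepB pre sc w) (t0, t0, 0, l0, l0 + 1)

-- (best, start, end) for one strip
def candB (pre : List (List Int)) (n sc w : Int) : Int × Int × Int :=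
  let r := innerB pre n sc w
  (r.2.1, if r.2.1 ≤ 0 then r.2.2.1 else r.2.2.2.2, r.2.2.1)

def updB (st : Int × Int × Int × Int × Int) (c : Int × Int × Int) (sc w : Int) :
    Int × Int × Int × Int × Int :=
  if c.1 > st.1 then (c.1, c.2.1, sc, sc + w - 1, c.2.2) else st

def max_matrix_alt (matrix : List (List Int)) : Int × List (List Int) :=
  let row0 := PySem.List.pyGetD matrix 0 []
  let n : Int := (row0.length : Int)
  let pre := preB matrix n
  let st := (PySem.List.pyRange 1 (n + 1) 1).foldl (fun st w =>
      (PySem.List.pyRange 0 (n + 1 - w) 1).foldl (fun st sc =>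
        updB st (candB pre n sc w) sc w) st)
    (PySem.List.pyGetD row0 0 0, 0, 0, 0, 0)
  (st.1, (PySem.List.pyRange st.2.1 (st.2.2.2.2 + 1) 1).map
    (fun i => PySem.List.slice (PySem.List.pyGetD matrix i [])
      (some st.2.2.1) (some (st.2.2.2.1 + 1))))

-- ===== PRECONDITION & SPEC =====
-- Pre_ excludes exactly the inputs where A raises IndexError: the empty matrix, an empty first
-- row (matrix[0][0]), and fewer rows than len(matrix[0]) (A indexes matrix[i] for i < len(matrix[0])).
def Pre_max_matrix (matrix : List (List Int)) : Prop :=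
  matrix ≠ [] ∧ matrix.getD 0 [] ≠ [] ∧ (matrix.getD 0 []).length ≤ matrix.length
instance (matrix : List (List Int)) : Decidable (Pre_max_matrix matrix) := by
  unfold Pre_max_matrix; infer_instance

def pvWitness_max_matrix : List (List Int) := [[1, -2], [3, 4]]

def Spec_max_matrix (matrix : List (List Int)) (out : Int × List (List Int)) : Prop :=
  out = max_matrix_alt matrix
instance (matrix : List (List Int)) (out : Int × List (List Int)) :
    Decidable (Spec_max_matrix matrix out) := by unfold Spec_max_matrix; infer_instance

-- ===== CLAIM (what is proved, stated in full; the proofs are below) =====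
def Claim_equal_max_matrix : Prop := ∀ (matrix : List (List Int)), Dom_max_matrix matrix →
  Pre_max_matrix matrix → Spec_max_matrix matrix (max_matrix matrix)

-- ===== LEMMAS AND PROOFS =====

-- prefB builds exactly the list of prefix sums
lemma prefB_foldl (row : List Int) : ∀ (acc : List Int) (s : Int),
    (row.foldl (fun (p : List Int × Int) x => (p.1 ++ [p.2 + x], p.2 + x)) (acc, s)).1
      = acc ++ (List.range row.length).map (fun j => s + (row.take (j + 1)).sum) := by
  induction row with
  | nil => intro acc s; simp
  | cons x xs ih =>
    intro acc s
    simp only [List.foldl_cons]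
    rw [ih]
    have hmap : (List.range xs.length).map
          ((fun j => s + (List.take (j + 1) (x :: xs)).sum) ∘ Nat.succ)
        = (List.range xs.length).map (fun j => s + x + (List.take (j + 1) xs).sum) := by
      refine List.map_congr_left (fun j hj => ?_)
      simp only [Function.comp_apply, List.take_succ_cons, List.sum_cons]
      ring
    rw [List.length_cons, List.range_succ_eq_map, List.map_cons, List.map_map, hmap,
      List.append_assoc, List.singleton_append]
    simp

lemma length_prefB (row : List Int) : (prefB row).length = row.length + 1 := by
  unfold prefB; rw [prefB_foldl]; simp

lemma getD_prefB (row : List Int) (j : Nat) (hj : j ≤ row.length) :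
    (prefB row).getD j 0 = (row.take j).sum := by
  unfold prefB; rw [prefB_foldl]
  cases j with
  | zero => simp
  | succ k =>
    have hk : k < row.length := by omega
    simp only [List.singleton_append, List.getD_cons_succ]
    rw [PySem.List.getD_map_range _ _ _ _ hk]
    simp

lemma sum_take_drop (row : List Int) (a k : Nat) :
    (List.take k (List.drop a row)).sum = (row.take (a + k)).sum - (row.take a).sum := by
  rw [List.take_add]; simp

lemma getD_pref_idx (row : List Int) (b : Int) (hb : 0 ≤ b) :
    PySem.List.pyGetD (prefB row)
      (if b < ((row.length : Nat) : Int) then b else ((row.length : Nat) : Int)) 0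
      = (row.take b.toNat).sum := by
  by_cases h : b < ((row.length : Nat) : Int)
  · rw [if_pos h, show b = ((b.toNat : Nat) : Int) by omega, PySem.List.pyGetD_natCast,
      getD_prefB _ _ (by omega)]
    simp only [Int.toNat_natCast]
  · rw [if_neg h, PySem.List.pyGetD_natCast, getD_prefB _ _ le_rfl,
      List.take_of_length_le (le_refl _), List.take_of_length_le (by omega)]

lemma segB_eq_segA (matrix : List (List Int)) (n i sc w : Int)
    (hi0 : 0 ≤ i) (hin : i < n)
    (hsc : 0 ≤ sc) (hw : 0 ≤ w) :
    segB (preB matrix n) i sc (sc + w) = segA matrix i sc w := by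
  simp only [segB, preB]
  rw [PySem.List.pyGetD_map_pyRange_of_nonneg _ _ _ _ hi0 hin]
  have hlen : ((prefB (PySem.List.pyGetD matrix i [])).length : Int) - 1
      = (((PySem.List.pyGetD matrix i []).length : Nat) : Int) := by
    rw [length_prefB]; push_cast; ring
  rw [hlen, getD_pref_idx _ (sc + w) (by omega), getD_pref_idx _ sc hsc]
  unfold segA
  rw [PySem.List.slice_toNat _ hsc (by omega)]
  have h1 : (sc + w).toNat - sc.toNat = w.toNat := by omega
  have h2 : (sc + w).toNat = sc.toNat + w.toNat := by omega
  rw [h1, sum_take_drop, ← h2]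

lemma walkA_stop (tr : List Int) (idx : Int)
    (h : ¬(PySem.List.pyGetD tr idx 0 > 0 ∧ 0 ≤ idx)) : walkA tr idx = idx := by
  rw [walkA, dif_neg h]

lemma walkA_step' (tr : List Int) (idx : Int)
    (h : PySem.List.pyGetD tr idx 0 > 0 ∧ 0 ≤ idx) : walkA tr idx = walkA tr (idx - 1) := by
  rw [walkA, dif_pos h]

-- walkA only reads entries 0..idx (and stops at -1 whatever trans[-1] is)
lemma walkA_congr (tr tr' : List Int) (idx : Int)
    (h : ∀ u : Int, 0 ≤ u → u ≤ idx → PySem.List.pyGetD tr u 0 = PySem.List.pyGetD tr' u 0) :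
    walkA tr idx = walkA tr' idx := by
  by_cases h0 : 0 ≤ idx
  · have he := h idx h0 le_rfl
    by_cases h1 : PySem.List.pyGetD tr idx 0 > 0
    · rw [walkA_step' tr idx ⟨h1, h0⟩, walkA_step' tr' idx ⟨by rw [← he]; exact h1, h0⟩]
      exact walkA_congr tr tr' (idx - 1) (fun u hu h2 => h u hu (by omega))
    · rw [walkA_stop tr idx (fun hc => h1 hc.1),
        walkA_stop tr' idx (fun hc => h1 (by rw [he]; exact hc.1))]
  · rw [walkA_stop tr idx (fun hc => h0 hc.2), walkA_stop tr' idx (fun hc => h0 hc.2)]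
termination_by (idx + 1).toNat
decreasing_by omega

-- the per-strip loop invariant relating A's (trans, maxseq, end) to B's (t, best, end, lastnp, start_cand)
lemma inner_inv (matrix pre : List (List Int)) (n sc w : Int)
    (hseg : ∀ i : Int, 0 ≤ i → i < n → segB pre i sc (sc + w) = segA matrix i sc w)
    (hn1 : 1 ≤ n) :
    ∀ j : Int, 1 ≤ j → j ≤ n →
    (let a := (PySem.List.pyRange 1 j).foldl (stepA matrix sc w)
        (PySem.List.pySetD (List.replicate n.toNat (0 : Int)) 0 (segA matrix 0 sc w),
          segA matrix 0 sc w, 0);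
     let t0 := segB pre 0 sc (sc + w);
     let l0 : Int := if t0 ≤ 0 then 0 else -1;
     let b := (PySem.List.pyRange 1 j).foldl (stepB pre sc w) (t0, t0, 0, l0, l0 + 1);
     a.1.length = n.toNat ∧ b.1 = PySem.List.pyGetD a.1 (j - 1) 0 ∧ b.2.1 = a.2.1 ∧
     b.2.2.1 = a.2.2 ∧ 0 ≤ a.2.2 ∧ a.2.2 ≤ j - 1 ∧ a.2.1 = PySem.List.pyGetD a.1 a.2.2 0 ∧
     walkA a.1 (j - 1) = b.2.2.2.1 ∧ (0 < a.2.1 → walkA a.1 a.2.2 + 1 = b.2.2.2.2)) := by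
  intro j hj1
  induction j, hj1 using Int.le_induction with
  | base =>
    intro _
    have hs0 := hseg 0 le_rfl (by omega)
    have h11 : (1 : Int) - 1 = 0 := by ring
    simp only [PySem.List.pyRange_one_eq_nil (le_refl (1 : Int)), List.foldl_nil, hs0, h11,
      PySem.List.pySetD_of_nonneg _ _ (le_refl (0 : Int))]
    set s0 := segA matrix 0 sc w with hs0def
    set tr0 := (List.replicate n.toNat (0 : Int)).set (Int.toNat 0) s0 with htr0
    have hlen : tr0.length = n.toNat := by simp [htr0]
    have hget : PySem.List.pyGetD tr0 0 0 = s0 := by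
      rw [PySem.List.pyGetD_eq_getElem _ _ le_rfl (by rw [hlen]; omega)]
      simp [htr0]
    have hwalk : walkA tr0 0 = if s0 ≤ 0 then 0 else -1 := by
      by_cases hp : 0 < s0
      · rw [walkA_step' _ _ ⟨by rw [hget]; exact hp, le_rfl⟩,
          show (0 : Int) - 1 = -1 by ring, walkA_stop _ _ (fun hc => by omega),
          if_neg (by omega)]
      · rw [walkA_stop _ _ (fun hc => by rw [hget] at hc; omega), if_pos (by omega)]
    refine ⟨hlen, hget.symm, by trivial, by trivial, le_rfl, by omega, hget.symm, hwalk, ?_⟩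
    intro hp
    rw [hwalk, if_neg (by omega)]
  | succ j hj ih =>
    intro hjn
    have ihh := ih (by omega)
    simp only at ihh ⊢
    rw [PySem.List.pyRange_one_succ_right (by omega : (1 : Int) ≤ j)]
    rw [List.foldl_append, List.foldl_append, List.foldl_cons, List.foldl_cons,
      List.foldl_nil, List.foldl_nil]
    set a := (PySem.List.pyRange 1 j).foldl (stepA matrix sc w)
        (PySem.List.pySetD (List.replicate n.toNat (0 : Int)) 0 (segA matrix 0 sc w),
          segA matrix 0 sc w, 0) with ha
    set t0 := segB pre 0 sc (sc + w) with ht0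
    set b := (PySem.List.pyRange 1 j).foldl (stepB pre sc w)
        (t0, t0, 0, if t0 ≤ 0 then 0 else -1, (if t0 ≤ 0 then 0 else -1) + 1) with hb
    obtain ⟨hlen, ht, hbest, hen, hen0, henj, hmx, hlnp, hstc⟩ := ihh
    have hjn' : j < n := by omega
    have hjlen : j.toNat < a.1.length := by rw [hlen]; omega
    have hsegj := hseg j (by omega) hjn'
    have hset : ∀ v : Int, PySem.List.pySetD a.1 j v = a.1.set j.toNat v :=
      fun v => PySem.List.pySetD_of_nonneg _ _ (by omega)
    have hgetj : ∀ v : Int, PySem.List.pyGetD (a.1.set j.toNat v) j 0 = v := by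
      intro v
      rw [PySem.List.pyGetD_eq_getElem _ _ (by omega) (by simp only [List.length_set]; omega)]
      simp
    have hgetlt : ∀ (v u : Int), 0 ≤ u → u < j →
        PySem.List.pyGetD (a.1.set j.toNat v) u 0 = PySem.List.pyGetD a.1 u 0 := by
      intro v u hu0 huj
      rw [PySem.List.pyGetD_eq_getElem _ _ hu0 (by simp only [List.length_set]; omega),
        PySem.List.pyGetD_eq_getElem _ _ hu0 (by omega)]
      rw [List.getElem_set_ne (by omega)]
    have hcongr : ∀ (v e : Int), e ≤ j - 1 →
        walkA (a.1.set j.toNat v) e = walkA a.1 e := by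
      intro v e he
      exact walkA_congr _ _ _ (fun u hu hue => hgetlt v u hu (by omega))
    have h21 : j + 1 - 1 = j := by ring
    simp only [stepA, stepB, hsegj, ← ht, h21, hbest, hen]
    by_cases hneg : b.1 < 0
    · rw [if_pos (by omega : segA matrix j sc w > segA matrix j sc w + b.1), if_pos hneg,
        hset]
      dsimp only
      refine ⟨by simp only [List.length_set]; exact hlen, hgetj _ |>.symm, rfl, rfl, hen0,
        by omega, ?_, ?_, ?_⟩
      · rw [hgetlt _ a.2.2 hen0 (by omega)]; exact hmx
      · by_cases hp : 0 < segA matrix j sc w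
        · rw [walkA_step' _ _ ⟨by rw [hgetj]; exact hp, by omega⟩, hcongr _ _ (by omega),
            hlnp, if_neg (by omega)]
        · rw [walkA_stop _ _ (fun hc => by rw [hgetj] at hc; omega), if_pos (by omega)]
      · intro hp
        rw [hcongr _ _ (by omega)]
        exact hstc hp
    · rw [if_neg (by omega : ¬(segA matrix j sc w > segA matrix j sc w + b.1)), if_neg hneg]
      by_cases hup : segA matrix j sc w + b.1 ≥ a.2.1
      · rw [if_pos hup, if_pos hup, hset]
        dsimp only
        refine ⟨by simp only [List.length_set]; exact hlen, hgetj _ |>.symm, rfl, rfl,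
          by omega, by omega, hgetj _ |>.symm, ?_, ?_⟩
        · by_cases hp : 0 < segA matrix j sc w + b.1
          · rw [walkA_step' _ _ ⟨by rw [hgetj]; exact hp, by omega⟩, hcongr _ _ (by omega),
              hlnp, if_neg (by omega)]
          · rw [walkA_stop _ _ (fun hc => by rw [hgetj] at hc; omega), if_pos (by omega)]
        · intro hp
          rw [walkA_step' _ _ ⟨by rw [hgetj]; omega, by omega⟩, hcongr _ _ (by omega), hlnp]
      · rw [if_neg hup, if_neg hup, hset]
        dsimp only
        refine ⟨by simp only [List.length_set]; exact hlen, hgetj _ |>.symm, rfl, rfl, hen0,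
          by omega, ?_, ?_, ?_⟩
        · rw [hgetlt _ a.2.2 hen0 (by omega)]; exact hmx
        · by_cases hp : 0 < segA matrix j sc w + b.1
          · rw [walkA_step' _ _ ⟨by rw [hgetj]; exact hp, by omega⟩, hcongr _ _ (by omega),
              hlnp, if_neg (by omega)]
          · rw [walkA_stop _ _ (fun hc => by rw [hgetj] at hc; omega), if_pos (by omega)]
        · intro hp
          rw [hcongr _ _ (by omega)]
          exact hstc hp

-- the two strip candidates coincide
lemma cand_eq (matrix : List (List Int)) (n sc w : Int) (hn1 : 1 ≤ n)
    (hsc : 0 ≤ sc) (hw : 0 ≤ w) :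
    candB (preB matrix n) n sc w = candA matrix n sc w := by
  have hseg : ∀ i : Int, 0 ≤ i → i < n →
      segB (preB matrix n) i sc (sc + w) = segA matrix i sc w :=
    fun i h1 h2 => segB_eq_segA matrix n i sc w h1 h2 hsc hw
  have H := inner_inv matrix (preB matrix n) n sc w hseg hn1 n hn1 le_rfl
  simp only at H
  obtain ⟨_, _, hbest, hen, _, _, _, _, hstc⟩ := H
  simp only [candA, candB, innerA, innerB, hbest, hen]
  by_cases h : (((PySem.List.pyRange 1 n).foldl (stepA matrix sc w)
      (PySem.List.pySetD (List.replicate n.toNat (0 : Int)) 0 (segA matrix 0 sc w),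
        segA matrix 0 sc w, 0)).2.1 ≤ 0)
  · rw [if_pos h, if_pos h]
  · rw [if_neg h, if_neg h, ← hstc (by omega)]

-- ===== VERDICT (by name: the statement is the Claim_ definition above) =====
theorem max_matrix_spec : Claim_equal_max_matrix := by
  intro matrix _ hpre
  obtain ⟨hne, hr0, hlenp⟩ := hpre
  unfold Spec_max_matrix max_matrix max_matrix_alt
  simp only
  have hrow0 : PySem.List.pyGetD matrix 0 [] = matrix.getD 0 [] := PySem.List.pyGetD_zero _ _
  have hn1 : (1 : Int) ≤ ((PySem.List.pyGetD matrix 0 []).length : Int) := by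
    rw [hrow0]
    cases h : matrix.getD 0 [] with
    | nil => exact absurd h hr0
    | cons y ys => simp
  set row0 := PySem.List.pyGetD matrix 0 [] with hrdef
  have houter :
      (PySem.List.pyRange 1 ((row0.length : Int) + 1)).foldl (fun st w =>
        (PySem.List.pyRange 0 ((row0.length : Int) + 1 - w)).foldl (fun st sc =>
          updA st (candA matrix (row0.length : Int) sc w) sc w) st)
        (PySem.List.pyGetD row0 0 0, 0, 0, 0, 0)
      = (PySem.List.pyRange 1 ((row0.length : Int) + 1)).foldl (fun st w =>
        (PySem.List.pyRange 0 ((row0.length : Int) + 1 - w)).foldl (fun st sc =>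
          updB st (candB (preB matrix (row0.length : Int)) (row0.length : Int) sc w) sc w) st)
        (PySem.List.pyGetD row0 0 0, 0, 0, 0, 0) := by
    apply PySem.List.foldl_congr_mem
    intro st w hw
    rw [PySem.List.mem_pyRange_one] at hw
    apply PySem.List.foldl_congr_mem
    intro st' sc hsc
    rw [PySem.List.mem_pyRange_one] at hsc
    rw [cand_eq matrix (row0.length : Int) sc w hn1 (by omega) (by omega)]
    rfl
  rw [houter, PySem.List.foldl_append_singleton_eq_map, List.nil_append]
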